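-- pv_equiv track=rewrite | github.com/matteogabburo/AsciiWords | ascii_word.py | add_under
-- ===== SOURCE A (Python) =====
-- def add_under(s, seq):
--     to_add = seq.split('\n')
--     to_add = [' ' if a == '' else a for a in to_add]
--     new_s = s[:]
--     len_s = len(new_s[0])
--     for i in range(len(to_add)):
--         new_l = []
--         j = 0
--         while j < len_s:
--             for c in to_add[i]:
--                 if j >= len_s:
--                     break
--                 new_l.append(c)
--                 j += 1
--         new_s.append(new_l)
--     return new_s
-- ===== SOURCE B (Python) =====
-- def add_under(s, seq):
--     len_s = len(s[0])
--     tiles = [' ' if t == '' else t for t in seq.split('\n')]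
--     return s + [list((t * (len_s // len(t) + 1))[:len_s]) for t in tiles]
-- ===== Notes on version B (the rewrite author's own statement) =====
-- stated objective: simpler
-- what changed: The cyclic while/for fill loop per row is replaced by string repetition-and-truncation ((t * (len_s//len(t)+1))[:len_s]) inside a single list comprehension appended to s.
import Mathlib
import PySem

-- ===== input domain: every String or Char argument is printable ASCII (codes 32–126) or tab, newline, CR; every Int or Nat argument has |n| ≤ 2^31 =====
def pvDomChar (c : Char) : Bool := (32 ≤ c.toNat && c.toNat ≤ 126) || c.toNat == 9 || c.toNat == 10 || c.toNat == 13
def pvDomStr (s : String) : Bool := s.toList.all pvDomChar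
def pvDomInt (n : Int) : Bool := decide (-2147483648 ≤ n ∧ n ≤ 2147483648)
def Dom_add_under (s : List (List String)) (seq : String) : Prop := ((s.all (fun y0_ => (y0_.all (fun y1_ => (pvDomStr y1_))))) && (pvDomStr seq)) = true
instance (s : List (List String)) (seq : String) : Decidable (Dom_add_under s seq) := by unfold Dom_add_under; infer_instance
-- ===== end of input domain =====

-- B replaces A's per-row cyclic while/for fill loop by repetition-and-truncation
-- ((t * (len_s//len(t)+1))[:len_s]) inside one comprehension appended to s (objective: simpler).
-- Neither program mutates s.

-- ===== PORT A =====
-- the inner `for c in to_add[i]: if j >= len_s: break; new_l.append(c); j += 1`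
def pvInnerFor (t : List Char) (len_s : Nat) (j : Nat) (acc : List String) : List String × Nat :=
  match t with
  | [] => (acc, j)
  | c :: cs =>
    if j ≥ len_s then (acc, j)
    else pvInnerFor cs len_s (j + 1) (acc ++ [c.toString])

theorem pvInnerFor_snd_le (t : List Char) (len_s j : Nat) (acc : List String) :
    j ≤ (pvInnerFor t len_s j acc).2 := by
  induction t generalizing j acc with
  | nil => simp [pvInnerFor]
  | cons c cs ih =>
    simp only [pvInnerFor]
    split
    · exact le_refl _
    · exact Nat.le_trans (Nat.le_succ j) (ih (j + 1) _)

theorem pvInnerFor_snd_gt (t : List Char) (len_s j : Nat) (acc : List String)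
    (ht : t ≠ []) (hj : j < len_s) : j < (pvInnerFor t len_s j acc).2 := by
  cases t with
  | nil => exact absurd rfl ht
  | cons c cs =>
    simp only [pvInnerFor, if_neg (Nat.not_le.mpr hj)]
    exact Nat.lt_of_lt_of_le (Nat.lt_succ_self j) (pvInnerFor_snd_le cs len_s (j + 1) _)

-- the outer `while j < len_s`.  The `t = []` test is a totality guard only: in A
-- every tile is non-empty ('' is normalised to ' '), so Python never loops forever here.
def pvWhileFill (t : List Char) (len_s : Nat) (j : Nat) (acc : List String) : List String :=
  if h : j < len_s then
    if ht : t = [] then acc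
    else
      let r := pvInnerFor t len_s j acc
      pvWhileFill t len_s r.2 r.1
  else acc
termination_by len_s - j
decreasing_by
  have := pvInnerFor_snd_gt t len_s j acc ht h
  omega

def add_under (s : List (List String)) (seq : String) : List (List String) :=
  let to_add := (PySem.Chars.splitOn seq.toList "\n".toList).map String.ofList   -- seq.split('\n')
  let to_add := to_add.map (fun a => if a = "" then " " else a)
  let new_s := s                                    -- s[:] (no mutation in Lean; the copy is the identity)
  let len_s := (new_s.headD []).length              -- len(new_s[0]); Pre_ excludes s = [], where Python raises IndexError
  to_add.foldl (fun ns t => ns ++ [pvWhileFill t.toList len_s 0 []]) new_s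

-- ===== PORT B =====
def add_under_alt (s : List (List String)) (seq : String) : List (List String) :=
  let len_s := (s.headD []).length                  -- len(s[0]); Pre_ excludes s = [], where Python raises IndexError
  let tiles := ((PySem.Chars.splitOn seq.toList "\n".toList).map String.ofList).map
    (fun t => if t = "" then " " else t)
  -- (t * (len_s // len(t) + 1))[:len_s]: string repetition is replicate/flatten
  -- (count ≥ 1, so exact), the nonnegative-bound slice is take, list(row) maps chars to 1-char strings
  s ++ tiles.map (fun t =>
    (((List.replicate (len_s / t.toList.length + 1) t.toList).flatten).take len_s).map
      (fun c => c.toString))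

-- ===== PRECONDITION & SPEC =====
-- Pre_ excludes exactly s = [], on which Python A (and B alike) raise IndexError at s[0].
def Pre_add_under (s : List (List String)) (seq : String) : Prop := s ≠ []
instance (s : List (List String)) (seq : String) : Decidable (Pre_add_under s seq) := by unfold Pre_add_under; infer_instance
def pvWitness_add_under : List (List String) × String := ([["a", "b", "c"]], "xy\nz")

def Spec_add_under (s : List (List String)) (seq : String) (out : List (List String)) : Prop := out = add_under_alt s seq
instance (s : List (List String)) (seq : String) (out : List (List String)) : Decidable (Spec_add_under s seq out) := by unfold Spec_add_under; infer_instance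

-- ===== CLAIM (what is proved, stated in full; the proofs are below) =====
def Claim_equal_add_under : Prop := ∀ (s : List (List String)) (seq : String), Dom_add_under s seq → Pre_add_under s seq → Spec_add_under s seq (add_under s seq)

-- ===== LEMMAS AND PROOFS =====

-- the chunked cyclic fill: n chars taken from repeated copies of t
def pvFill (t : List Char) (n : Nat) : List Char :=
  if n = 0 then []
  else if ht : t = [] then []
  else t.take n ++ pvFill t (n - t.length)
termination_by n
decreasing_by
  have : t.length ≠ 0 := fun h => ht (List.eq_nil_of_length_eq_zero h)
  omega

theorem pvFill_nil (n : Nat) : pvFill [] n = [] := by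
  rw [pvFill]; simp

theorem pvInnerFor_eq (t : List Char) (len_s j : Nat) (acc : List String) (hj : j ≤ len_s) :
    pvInnerFor t len_s j acc =
      (acc ++ (t.take (len_s - j)).map (fun c => c.toString), min (j + t.length) len_s) := by
  induction t generalizing j acc with
  | nil => simp [pvInnerFor]; omega
  | cons c cs ih =>
    simp only [pvInnerFor]
    by_cases h : j ≥ len_s
    · rw [if_pos h]
      have h0 : len_s - j = 0 := Nat.sub_eq_zero_of_le h
      have hje : j = len_s := Nat.le_antisymm hj h
      simp [h0, hje]
    · rw [if_neg h]
      have hj1 : j + 1 ≤ len_s := Nat.lt_of_not_le h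
      rw [ih _ _ hj1]
      have h1 : len_s - j = (len_s - (j + 1)) + 1 := by omega
      rw [h1]
      simp only [List.take_succ_cons, List.map_cons, List.length_cons, Prod.mk.injEq]
      refine ⟨by simp, by omega⟩

theorem pvWhileFill_eq (t : List Char) (len_s : Nat) : ∀ (n j : Nat) (acc : List String),
    j ≤ len_s → len_s - j = n →
    pvWhileFill t len_s j acc = acc ++ (pvFill t (len_s - j)).map (fun c => c.toString) := by
  intro n
  induction n using Nat.strong_induction_on with
  | _ n ih =>
    intro j acc hj hn
    by_cases ht : t = []
    · subst ht
      rw [pvWhileFill, pvFill_nil]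
      split <;> simp
    · rw [pvWhileFill]
      by_cases h : j < len_s
      · rw [dif_pos h, dif_neg ht]
        have htl : t.length ≠ 0 := fun h0 => ht (List.eq_nil_of_length_eq_zero h0)
        rw [pvInnerFor_eq t len_s j acc (Nat.le_of_lt h)]
        have hj' : min (j + t.length) len_s ≤ len_s := Nat.min_le_right _ _
        have hlt : len_s - min (j + t.length) len_s < n := by omega
        rw [ih _ hlt _ _ hj' rfl]
        have h2 : len_s - min (j + t.length) len_s = (len_s - j) - t.length := by omega
        rw [h2]
        conv_rhs => rw [pvFill]
        rw [if_neg (by omega : ¬ len_s - j = 0), dif_neg ht]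
        simp [List.map_append]
      · rw [dif_neg h]
        have h0 : len_s - j = 0 := by omega
        rw [h0, pvFill]
        simp

theorem take_flatten_replicate (t : List Char) (ht : t ≠ []) : ∀ (k n : Nat),
    n ≤ k * t.length → ((List.replicate k t).flatten).take n = pvFill t n := by
  intro k
  induction k with
  | zero =>
    intro n hk
    have : n = 0 := by simpa using hk
    subst this
    rw [pvFill]; simp
  | succ k ih =>
    intro n hk
    rw [List.replicate_succ, List.flatten_cons, List.take_append]
    by_cases hn : n = 0
    · subst hn
      rw [pvFill]; simp
    · have htl : t.length ≠ 0 := fun h0 => ht (List.eq_nil_of_length_eq_zero h0)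
      have hk' : n - t.length ≤ k * t.length := by
        rw [Nat.succ_mul] at hk; omega
      rw [ih _ hk']
      conv_rhs => rw [pvFill]
      rw [if_neg hn, dif_neg ht]

theorem row_eq (t : String) (len_s : Nat) (ht : t.toList ≠ []) :
    pvWhileFill t.toList len_s 0 [] =
      (((List.replicate (len_s / t.toList.length + 1) t.toList).flatten).take len_s).map
        (fun c => c.toString) := by
  have htl : t.toList.length ≠ 0 := fun h0 => ht (List.eq_nil_of_length_eq_zero h0)
  rw [pvWhileFill_eq t.toList len_s len_s 0 [] (Nat.zero_le _) (Nat.sub_zero _)]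
  rw [take_flatten_replicate t.toList ht _ len_s ?_]
  · simp
  · have h1 := Nat.div_add_mod len_s t.toList.length
    rw [Nat.mul_comm] at h1
    have h2 := Nat.mod_lt len_s (Nat.pos_of_ne_zero htl)
    rw [Nat.add_mul, Nat.one_mul]
    omega

theorem tile_ne_nil (a : String) : (if a = "" then " " else a).toList ≠ [] := by
  by_cases h : a = ""
  · simp [h]
  · rw [if_neg h]
    intro hc
    apply h
    have := congrArg String.ofList hc
    simpa using this

-- ===== VERDICT (by name: the statement is the Claim_ definition above) =====
theorem add_under_spec : Claim_equal_add_under := by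
  intro s seq _ _
  unfold Spec_add_under add_under add_under_alt
  rw [PySem.List.foldl_append_singleton_eq_map]
  congr 1
  refine List.map_congr_left ?_
  intro t hmem
  obtain ⟨a, _, rfl⟩ := List.mem_map.mp hmem
  exact row_eq _ _ (tile_ne_nil a)
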